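-- pv_equiv track=rewrite | github.com/FaustoFaggion/mini_piscina_pyton_jango | day01/ex04/state.py | pdf_dictionaries
-- ===== SOURCE A (Python) =====
-- def pdf_dictionaries(city):
--     states = {
--         "Oregon" : "OR",
--         "Alabama" : "AL",
--         "New Jersey": "NJ",
--         "Colorado" : "CO"
--     }
--     capital_cities = {
--         "OR": "Salem",
--         "AL": "Montgomery",
--         "NJ": "Trenton",
--         "CO": "Denver"
--     }
--
--     k = " "
--     for key, value in capital_cities.items():
--         if value == city:
--             k = key
--             break
--     for key, value in states.items():
--         if value == k:
--             return key
--     return "Unknown state\n"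
-- ===== SOURCE B (Python) =====
-- CAPITAL_TO_STATE = {
--     "Salem": "Oregon",
--     "Montgomery": "Alabama",
--     "Trenton": "New Jersey",
--     "Denver": "Colorado",
-- }
--
-- def pdf_dictionaries(city):
--     return CAPITAL_TO_STATE.get(city, "Unknown state\n")
-- ===== Notes on version B (the rewrite author's own statement) =====
-- stated objective: simpler
-- what changed: Replaced A's two chained linear scans (capital->abbreviation, then abbreviation->state) with one precomputed capital->state table and a single .get with default; no loops, no sentinel variable.
import Mathlib
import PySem

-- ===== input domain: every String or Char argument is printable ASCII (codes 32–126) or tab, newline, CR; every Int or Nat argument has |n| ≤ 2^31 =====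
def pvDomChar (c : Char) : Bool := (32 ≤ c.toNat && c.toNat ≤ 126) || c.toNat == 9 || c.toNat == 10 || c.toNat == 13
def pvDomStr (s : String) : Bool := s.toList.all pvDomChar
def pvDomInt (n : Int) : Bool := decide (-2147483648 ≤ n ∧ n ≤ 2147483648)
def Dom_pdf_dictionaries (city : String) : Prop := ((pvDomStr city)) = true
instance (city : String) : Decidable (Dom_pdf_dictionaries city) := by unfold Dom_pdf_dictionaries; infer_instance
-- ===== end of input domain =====

-- B replaces A's two chained scans with one precomputed capital->state table lookup (simpler).


-- ===== PORT A =====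
-- first loop of A: scan pairs, break with the key on first value match (k stays " " otherwise)
def pvScanBreak : List (String × String) → String → String → String
  | [], _, k => k
  | (key, value) :: rest, city, k =>
      if value == city then key else pvScanBreak rest city k

-- second loop of A: return key on first value match, else the fall-through default
def pvScanReturn : List (String × String) → String → String
  | [], _ => "Unknown state\n"
  | (key, value) :: rest, k =>
      if value == k then key else pvScanReturn rest k

def pdf_dictionaries (city : String) : String :=
  let states : List (String × String) :=
    [("Oregon", "OR"), ("Alabama", "AL"), ("New Jersey", "NJ"), ("Colorado", "CO")]
  let capital_cities : List (String × String) :=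
    [("OR", "Salem"), ("AL", "Montgomery"), ("NJ", "Trenton"), ("CO", "Denver")]
  let k := pvScanBreak capital_cities city " "
  pvScanReturn states k

-- ===== PORT B =====
def pvCapitalToState : PySem.Dict String String :=
  PySem.Dict.mk [("Salem", "Oregon"), ("Montgomery", "Alabama"), ("Trenton", "New Jersey"), ("Denver", "Colorado")]

def pdf_dictionaries_alt (city : String) : String :=
  PySem.Dict.getD pvCapitalToState city "Unknown state\n"

-- ===== PRECONDITION & SPEC =====
def Spec_pdf_dictionaries (city : String) (out : String) : Prop := out = pdf_dictionaries_alt city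
instance (city : String) (out : String) : Decidable (Spec_pdf_dictionaries city out) := by unfold Spec_pdf_dictionaries; infer_instance

-- ===== CLAIM (what is proved, stated in full; the proofs are below) =====
def Claim_equal_pdf_dictionaries : Prop := ∀ (city : String), Dom_pdf_dictionaries city → Spec_pdf_dictionaries city (pdf_dictionaries city)

-- ===== LEMMAS AND PROOFS =====

theorem pdf_dictionaries_eq_alt (city : String) :
    pdf_dictionaries city = pdf_dictionaries_alt city := by
  by_cases h1 : city = "Salem"
  · subst h1; decide
  by_cases h2 : city = "Montgomery"
  · subst h2; decide
  by_cases h3 : city = "Trenton"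
  · subst h3; decide
  by_cases h4 : city = "Denver"
  · subst h4; decide
  · simp [pdf_dictionaries, pdf_dictionaries_alt, pvScanBreak, pvScanReturn,
      pvCapitalToState, PySem.Dict.getD, PySem.Dict.get?_mk_cons, PySem.Dict.get?,
      Ne.symm h1, Ne.symm h2, Ne.symm h3, Ne.symm h4]

-- ===== VERDICT (by name: the statement is the Claim_ definition above) =====
theorem pdf_dictionaries_spec : Claim_equal_pdf_dictionaries := by
  intro city _
  exact pdf_dictionaries_eq_alt city
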